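-- pv_equiv track=rewrite | github.com/lcouedor/song_difficulty | main.py | nbAlterationsNonCle
-- ===== SOURCE A (Python) =====
-- notesNoAlt = ['C','D','E','F','G','A','B']
--
-- ordre_alt = ['F','C','G','D','A','E','B']
--
-- def nbAlterationsNonCle(nbAltCle, array): #nbAltCle négatif si bemol, positif si diez
--     notes_alt = []
--     notes_autorise = notesNoAlt.copy()
--     nbAlt = 0
--
--     #cas des diez
--     if(nbAltCle > 0):
--         for i in range(nbAltCle): #ajout des notes altérées
--             notes_alt.append(ordre_alt[i]+"#")
--
--     #cas des bémols
--     if(nbAltCle < 0):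
--         for i in range(abs(nbAltCle)):
--             notes_alt.append(ordre_alt[len(ordre_alt) -1 -i]+"b")
--
--     for i in range(len(notes_alt)): #replacement des notes "normales" par leur altération pour obtenir le tableau des notes de la gamme utilisée
--             index = notes_autorise.index(notes_alt[i][0]) #index de la note à replacer
--             notes_autorise[index] = notes_alt[i]
--
--     for i in range(len(array)):
--         if(array[i] != "" and array[i][:-1] not in notes_autorise and array[i][:-1] not in notesNoAlt): # [:-1] -> ne pas tenir compte du chiffre de l'octave
--             nbAlt+=1
--
--     return nbAlt
-- ===== SOURCE B (Python) =====
-- notesNoAlt = ['C','D','E','F','G','A','B']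
--
-- ordre_alt = ['F','C','G','D','A','E','B']
--
-- def nbAlterationsNonCle(nbAltCle, array):
--     # No altered-name table is built at all: a note belongs to the key's scale
--     # iff it is a natural name, or a two-character altered name whose letter sits
--     # at the right end of the circle of fifths (ordre_alt): index < nbAltCle for
--     # a sharp, index >= len(ordre_alt) + nbAltCle for a flat.
--     def in_scale(p):
--         if p in notesNoAlt:
--             return True
--         if len(p) == 2 and p[:1] in ordre_alt:
--             j = ordre_alt.index(p[:1])
--             if nbAltCle > 0 and p[1:] == '#':
--                 return j < nbAltCle
--             if nbAltCle < 0 and p[1:] == 'b':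
--                 return j >= len(ordre_alt) + nbAltCle
--         return False
--     count = 0
--     for x in array:
--         if x != "" and not in_scale(x[:-1]):
--             count += 1
--     return count
-- ===== Notes on version B (the rewrite author's own statement) =====
-- stated objective: alternative
-- what changed: B builds no note collection at all: A constructs notes_alt and splices it into a mutable notes_autorise table before a membership-counting pass, while B decides each entry directly by index arithmetic on the circle of fifths (a '#' note is in the scale iff ordre_alt.index(letter) < nbAltCle, a 'b' note iff the index is >= len(ordre_alt)+nbAltCle).
import Mathlib
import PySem

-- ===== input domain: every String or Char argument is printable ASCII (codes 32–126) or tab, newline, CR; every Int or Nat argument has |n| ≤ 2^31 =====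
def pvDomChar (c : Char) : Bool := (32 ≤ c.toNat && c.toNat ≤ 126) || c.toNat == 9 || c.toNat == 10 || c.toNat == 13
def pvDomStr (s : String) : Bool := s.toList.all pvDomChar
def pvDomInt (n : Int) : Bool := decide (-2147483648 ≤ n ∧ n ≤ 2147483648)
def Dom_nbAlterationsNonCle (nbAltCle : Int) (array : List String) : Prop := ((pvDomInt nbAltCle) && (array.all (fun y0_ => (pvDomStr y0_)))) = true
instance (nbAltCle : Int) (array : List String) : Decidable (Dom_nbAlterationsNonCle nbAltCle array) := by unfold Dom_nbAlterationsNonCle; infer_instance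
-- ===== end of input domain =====

-- B builds no note table: instead of A's altered-name list spliced into a mutable
-- allowed-notes list, B classifies each entry by index arithmetic on the circle of
-- fifths (objective: alternative). Return value only.

-- ===== PORT A =====
def notesNoAlt : List String := ["C", "D", "E", "F", "G", "A", "B"]

def ordre_alt : List String := ["F", "C", "G", "D", "A", "E", "B"]

-- notes_alt[i][0] : Python yields the 1-character string
def pvHead1 (s : String) : String :=
  match PySem.Str.pyGet? s 0 with
  | some c => String.ofList [c]
  | none => ""

-- the two append loops building notes_alt (sharp case, then flat case)
def pvNotesAltA (nbAltCle : Int) : List String :=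
  (if nbAltCle > 0 then
    (PySem.List.pyRange 0 nbAltCle 1).map
      (fun i => PySem.List.pyGetD ordre_alt i "" ++ "#")
  else []) ++
  (if nbAltCle < 0 then
    (PySem.List.pyRange 0 |nbAltCle| 1).map
      (fun i => PySem.List.pyGetD ordre_alt ((ordre_alt.length : Int) - 1 - i) "" ++ "b")
  else [])

-- the replacement loop over notes_alt mutating notes_autorise
def pvAutoriseA (nbAltCle : Int) : List String :=
  (PySem.List.pyRange 0 ((pvNotesAltA nbAltCle).length : Int) 1).foldl
    (fun na i =>
      let note := PySem.List.pyGetD (pvNotesAltA nbAltCle) i ""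
      let index := ((PySem.List.index? na (pvHead1 note)).getD 0 : Int)
      PySem.List.pySetD na index note)
    notesNoAlt

def nbAlterationsNonCle (nbAltCle : Int) (array : List String) : Int :=
  (PySem.List.pyRange 0 (array.length : Int) 1).foldl
    (fun nbAlt i =>
      if PySem.List.pyGetD array i "" ≠ "" &&
          !((pvAutoriseA nbAltCle).contains
              (PySem.Str.slice (PySem.List.pyGetD array i "") none (some (-1)))) &&
          !(notesNoAlt.contains
              (PySem.Str.slice (PySem.List.pyGetD array i "") none (some (-1)))) then
        nbAlt + 1
      else nbAlt)
    0

-- ===== PORT B =====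
-- Source B's in_scale: natural name, or a 2-character altered name whose letter's
-- position in ordre_alt passes the sharp/flat index test
def pvInScaleB (nbAltCle : Int) (p : String) : Bool :=
  if notesNoAlt.contains p then true
  else if PySem.Str.len p == 2 && ordre_alt.contains (PySem.Str.slice p none (some 1)) then
    -- j = ordre_alt.index(p[:1]) : guarded by the membership test just above
    let j : Int := ((PySem.List.index? ordre_alt (PySem.Str.slice p none (some 1))).getD 0 : Nat)
    if nbAltCle > 0 && (PySem.Str.slice p (some 1) none == "#") then decide (j < nbAltCle)
    else if nbAltCle < 0 && (PySem.Str.slice p (some 1) none == "b") then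
      decide ((ordre_alt.length : Int) + nbAltCle ≤ j)
    else false
  else false

def nbAlterationsNonCle_alt (nbAltCle : Int) (array : List String) : Int :=
  array.foldl
    (fun count x =>
      if !(x == "") && !(pvInScaleB nbAltCle (PySem.Str.slice x none (some (-1)))) then
        count + 1
      else count)
    0

-- ===== PRECONDITION & SPEC =====
-- Pre_ excludes exactly the inputs where the Python A raises: nbAltCle > 7
-- (IndexError building the sharps) and nbAltCle < -7 (ValueError or IndexError
-- in the flat/replacement loops).
def Pre_nbAlterationsNonCle (nbAltCle : Int) (array : List String) : Prop :=
  -7 ≤ nbAltCle ∧ nbAltCle ≤ 7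

instance (nbAltCle : Int) (array : List String) : Decidable (Pre_nbAlterationsNonCle nbAltCle array) := by
  unfold Pre_nbAlterationsNonCle; infer_instance

def pvWitness_nbAlterationsNonCle : Int × List String := (-3, ["C1", "D#4", "Bb2", ""])

def Spec_nbAlterationsNonCle (nbAltCle : Int) (array : List String) (out : Int) : Prop := out = nbAlterationsNonCle_alt nbAltCle array
instance (nbAltCle : Int) (array : List String) (out : Int) : Decidable (Spec_nbAlterationsNonCle nbAltCle array out) := by unfold Spec_nbAlterationsNonCle; infer_instance

-- ===== CLAIM (what is proved, stated in full; the proofs are below) =====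
def Claim_equal_nbAlterationsNonCle : Prop := ∀ (nbAltCle : Int) (array : List String), Dom_nbAlterationsNonCle nbAltCle array → Pre_nbAlterationsNonCle nbAltCle array → Spec_nbAlterationsNonCle nbAltCle array (nbAlterationsNonCle nbAltCle array)


-- ===== LEMMAS AND PROOFS =====

-- membership in two concrete list pairs agrees given mutual inclusion
theorem pvContainsOr {L1 L2 L3 : List String}
    (h1 : L1 ⊆ L2 ++ L3) (h2 : L3 ⊆ L1 ++ L2) (t : String) :
    (L1.contains t || L2.contains t) = (L2.contains t || L3.contains t) := by
  have ha := @h1 t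
  have hb := @h2 t
  simp only [List.mem_append] at ha hb
  rw [Bool.eq_iff_iff]
  simp only [Bool.or_eq_true, List.contains_eq_mem, decide_eq_true_eq]
  tauto

-- the character-pair shapes of every altered name A can ever build (|nbAltCle| ≤ 7)
def pvAllAltChars : List (List Char) :=
  [['F','#'],['C','#'],['G','#'],['D','#'],['A','#'],['E','#'],['B','#'],
   ['B','b'],['E','b'],['A','b'],['D','b'],['G','b'],['C','b'],['F','b']]

theorem pvNotesAltA_chars (n : Int) (hlo : -7 ≤ n) (hhi : n ≤ 7) :
    ∀ t ∈ pvNotesAltA n, t.toList ∈ pvAllAltChars := by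
  interval_cases n <;> decide

-- the heart of the equivalence: A's scale-as-list membership equals B's
-- circle-of-fifths index test, for every string
set_option maxHeartbeats 4000000 in
theorem pvScale_eq (n : Int) (hlo : -7 ≤ n) (hhi : n ≤ 7) (s : String) :
    (notesNoAlt.contains s || (pvNotesAltA n).contains s) = pvInScaleB n s := by
  have hAlt := pvNotesAltA_chars n hlo hhi
  by_cases hN : s ∈ notesNoAlt
  · simp [pvInScaleB, List.contains_eq_mem, hN]
  · by_cases hlen : s.toList.length = 2
    · obtain ⟨c, d, hcd⟩ : ∃ c d, s.toList = [c, d] := by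
        match h : s.toList with
        | [c, d] => exact ⟨c, d, rfl⟩
        | [] | [_] | _ :: _ :: _ :: _ => rw [h] at hlen; simp at hlen
      by_cases hc : c ∈ (['C','D','E','F','G','A','B'] : List Char)
      · by_cases hd : d ∈ (['#','b'] : List Char)
        · -- a genuine candidate altered name: s is one of 14 literals
          have hs : s = String.ofList [c, d] := by rw [← hcd, String.ofList_toList]
          subst hs
          fin_cases hc <;> fin_cases hd <;> (interval_cases n <;> decide)
        · -- second character is neither '#' nor 'b': both sides reject
          have hA : s ∉ pvNotesAltA n := by
            intro hmem
            have h2 := hAlt s hmem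
            rw [hcd] at h2
            simp only [pvAllAltChars, List.mem_cons, List.cons.injEq, List.not_mem_nil,
              or_false] at h2
            rcases h2 with h|h|h|h|h|h|h|h|h|h|h|h|h|h <;> (apply hd; simp [h.2.1])
          have hsharp : PySem.Str.slice s (some 1) none ≠ "#" := by
            intro he
            have := congrArg String.toList he
            simp [pysem, hcd] at this
            exact hd (by simp [this])
          have hflat : PySem.Str.slice s (some 1) none ≠ "b" := by
            intro he
            have := congrArg String.toList he
            simp [pysem, hcd] at this
            exact hd (by simp [this])
          simp [pvInScaleB, List.contains_eq_mem, hN, hA, hsharp, hflat]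
      · -- first character is not a note letter: both sides reject
        have hA : s ∉ pvNotesAltA n := by
          intro hmem
          have h2 := hAlt s hmem
          rw [hcd] at h2
          simp only [pvAllAltChars, List.mem_cons, List.cons.injEq, List.not_mem_nil,
            or_false] at h2
          rcases h2 with h|h|h|h|h|h|h|h|h|h|h|h|h|h <;> (apply hc; simp [h.1])
        have hord : PySem.Str.slice s none (some 1) ∉ ordre_alt := by
          intro hmem
          have ht : (PySem.Str.slice s none (some 1)).toList = [c] := by
            simp [pysem, hcd]
          simp only [ordre_alt, List.mem_cons, List.not_mem_nil, or_false] at hmem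
          rcases hmem with h|h|h|h|h|h|h <;>
            (apply hc; have := congrArg String.toList h; rw [ht] at this; simp at this;
             simp [this])
        simp [pvInScaleB, List.contains_eq_mem, hN, hA, hord]
    · -- a string that is not two characters long: both sides reject
      have hA : s ∉ pvNotesAltA n := by
        intro hmem
        have h2 : s.toList.length = 2 := by
          have hall : ∀ l ∈ pvAllAltChars, l.length = 2 := by decide
          exact hall _ (hAlt s hmem)
        exact hlen h2
      have hlen2 : ¬ ((s.length : Int) = 2) := by
        rw [← String.length_toList]
        omega
      simp [pvInScaleB, List.contains_eq_mem, hN, hA, hlen2]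

-- A's ported loop and B's ported loop count the same entries
theorem pvEq_of_scale (n : Int) (array : List String)
    (hlo : -7 ≤ n) (hhi : n ≤ 7)
    (h1 : pvAutoriseA n ⊆ notesNoAlt ++ pvNotesAltA n)
    (h2 : pvNotesAltA n ⊆ pvAutoriseA n ++ notesNoAlt) :
    nbAlterationsNonCle n array = nbAlterationsNonCle_alt n array := by
  unfold nbAlterationsNonCle nbAlterationsNonCle_alt
  rw [PySem.List.foldl_pyRange_zero_pyGetD'
        (f := fun (acc : Int) v =>
          if v ≠ "" &&
              !((pvAutoriseA n).contains (PySem.Str.slice v none (some (-1)))) &&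
              !(notesNoAlt.contains (PySem.Str.slice v none (some (-1)))) then
            acc + 1
          else acc)
        (d := "") (init := (0 : Int))]
  apply PySem.List.foldl_congr_mem
  intro acc x _
  have key := pvContainsOr h1 h2 (PySem.Str.slice x none (some (-1)))
  have key2 := pvScale_eq n hlo hhi (PySem.Str.slice x none (some (-1)))
  by_cases hx : x = ""
  · simp [hx]
  · simp only [hx, Bool.and_assoc, ← Bool.not_or, ne_eq]
    rw [key, key2]
    simp [hx]

-- ===== VERDICT (by name: the statement is the Claim_ definition above) =====
theorem nbAlterationsNonCle_spec : Claim_equal_nbAlterationsNonCle := by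
  intro n array _ hpre
  unfold Spec_nbAlterationsNonCle
  obtain ⟨h1, h2⟩ := hpre
  have hsub : (pvAutoriseA n ⊆ notesNoAlt ++ pvNotesAltA n) ∧
      (pvNotesAltA n ⊆ pvAutoriseA n ++ notesNoAlt) := by
    interval_cases n <;> exact ⟨by decide, by decide⟩
  exact pvEq_of_scale n array h1 h2 hsub.1 hsub.2
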